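-- pv_equiv track=rewrite | github.com/S0okJu/BOJ | 0-9999/1000-1999/1400-1499/1484/1484.py | solution
-- ===== SOURCE A (Python) =====
-- def solution(G: int):
--     result = []
--     left, right = 1, 2
--     while left < right:
--         diff = right * right - left * left
--         if diff == G:
--             result.append(right)
--             right += 1
--         elif diff < G:
--             right += 1
--         else:
--             left += 1
--     return result
-- ===== SOURCE B (Python) =====
-- def solution(G: int):
--     res = []
--     a = 1
--     while a * a < G:
--         if G % a == 0 and (G // a - a) % 2 == 0:
--             res.append((a + G // a) // 2)
--         a += 1
--     return sorted(res)
-- ===== Notes on version B (the rewrite author's own statement) =====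
-- stated objective: faster
-- what changed: Replaced the O(G) two-pointer sweep over (left,right) by enumerating the small divisors d of G with matching parity of d and G/d, emitting the corresponding right value (their half-sum) and sorting, which is O(sqrt(G)).
import Mathlib
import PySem

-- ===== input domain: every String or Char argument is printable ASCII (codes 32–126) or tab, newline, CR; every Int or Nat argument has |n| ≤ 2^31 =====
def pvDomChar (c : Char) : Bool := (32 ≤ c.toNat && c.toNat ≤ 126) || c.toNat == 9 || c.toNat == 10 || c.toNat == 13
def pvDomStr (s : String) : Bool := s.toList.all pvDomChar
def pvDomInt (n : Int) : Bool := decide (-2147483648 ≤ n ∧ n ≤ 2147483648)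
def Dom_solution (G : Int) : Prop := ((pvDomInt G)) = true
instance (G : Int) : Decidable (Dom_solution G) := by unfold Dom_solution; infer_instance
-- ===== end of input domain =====

-- B enumerates divisor pairs of G up to sqrt(G) instead of A's two-pointer sweep over all left/right up to G: same output, asymptotically faster.

-- ===== PORT A =====
-- A's while-loop, step for step; the Nat fuel only makes the recursion structural
-- (fuel 2*(max G 3 + 2) is proved sufficient below, so it never runs out).
def solutionLoop (G : Int) : Nat → Int → Int → List Int → List Int
  | 0, _, _, acc => acc
  | fuel + 1, left, right, acc =>
    if left < right then
      if right * right - left * left = G then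
        solutionLoop G fuel left (right + 1) (acc ++ [right])
      else if right * right - left * left < G then
        solutionLoop G fuel left (right + 1) acc
      else
        solutionLoop G fuel (left + 1) right acc
    else acc

def solution (G : Int) : List Int :=
  solutionLoop G (2 * (max G 3 + 2)).toNat 1 2 []

-- ===== PORT B =====
-- B's while-loop over candidate divisors a with a*a < G (fuel G.toNat is proved sufficient below).
def solutionAltLoop (G : Int) : Nat → Int → List Int → List Int
  | 0, _, res => res
  | fuel + 1, a, res =>
    if a * a < G then
      solutionAltLoop G fuel (a + 1)
        (if PySem.Int.mod G a = 0 ∧ PySem.Int.mod (PySem.Int.floordiv G a - a) 2 = 0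
         then res ++ [PySem.Int.floordiv (a + PySem.Int.floordiv G a) 2] else res)
    else res

def solution_alt (G : Int) : List Int :=
  PySem.List.sorted (solutionAltLoop G G.toNat 1 []) (fun x => x) false

-- ===== PRECONDITION & SPEC =====
def Spec_solution (G : Int) (out : List Int) : Prop := out = solution_alt G
instance (G : Int) (out : List Int) : Decidable (Spec_solution G out) := by unfold Spec_solution; infer_instance

-- ===== CLAIM (what is proved, stated in full; the proofs are below) =====
def Claim_equal_solution : Prop := ∀ (G : Int), Dom_solution G → Spec_solution G (solution G)

-- ===== LEMMAS AND PROOFS =====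

-- x is a value A appends: some 1 ≤ l < x has x² - l² = G
def pvValid (G x : Int) : Prop := ∃ l, 1 ≤ l ∧ l < x ∧ x * x - l * l = G

-- the divisor-side description of B's emitted values
def pvDivDesc (G d x : Int) : Prop :=
  d * d < G ∧ PySem.Int.mod G d = 0 ∧ PySem.Int.mod (PySem.Int.floordiv G d - d) 2 = 0 ∧
    x = PySem.Int.floordiv (d + PySem.Int.floordiv G d) 2

lemma sorted_ext : ∀ (xs ys : List Int), xs.Pairwise (· < ·) → ys.Pairwise (· < ·) →
    (∀ a, a ∈ xs ↔ a ∈ ys) → xs = ys := by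
  intro xs
  induction xs with
  | nil =>
    intro ys _ _ h
    cases ys with
    | nil => rfl
    | cons y t => exact absurd ((h y).2 (by simp)) (by simp)
  | cons x xt ih =>
    intro ys hx hy h
    cases ys with
    | nil => exact absurd ((h x).1 (by simp)) (by simp)
    | cons y yt =>
      have hxy : x = y := by
        have hxm : x = y ∨ x ∈ yt := by simpa using (h x).1 (by simp)
        have hym : y = x ∨ y ∈ xt := by simpa using (h y).2 (by simp)
        rcases hxm with h1 | h1
        · exact h1
        · rcases hym with h2 | h2
          · omega
          · have := (List.pairwise_cons.1 hx).1 y h2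
            have := (List.pairwise_cons.1 hy).1 x h1
            omega
      subst hxy
      have htail : ∀ a, a ∈ xt ↔ a ∈ yt := by
        intro a
        constructor
        · intro ha
          have hgt := (List.pairwise_cons.1 hx).1 a ha
          have : a ∈ x :: yt := (h a).1 (by simp [ha])
          rcases List.mem_cons.1 this with h1 | h1
          · omega
          · exact h1
        · intro ha
          have hgt := (List.pairwise_cons.1 hy).1 a ha
          have : a ∈ x :: xt := (h a).2 (by simp [ha])
          rcases List.mem_cons.1 this with h1 | h1
          · omega
          · exact h1
      exact congrArg (x :: ·) (ih yt (List.pairwise_cons.1 hx).2 (List.pairwise_cons.1 hy).2 htail)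

-- A-side characterisation: with enough fuel, running A's loop from a reachable state
-- appends exactly the valid rights ≥ right, in increasing order.
lemma loopA_spec (G : Int) : ∀ (fuel : Nat) (left right : Int) (acc : List Int),
    (2 * (max G 3 + 2) - right - left).toNat ≤ fuel →
    1 ≤ left → left ≤ right → 2 ≤ right → right ≤ max G 3 + 2 →
    (∀ l' r', 1 ≤ l' → l' < left → right ≤ r' → l' < r' → r' * r' - l' * l' ≠ G) →
    (left = 1 ∨ G < right * right - (left - 1) * (left - 1)) →
    ∃ tail, solutionLoop G fuel left right acc = acc ++ tail ∧
      tail.Pairwise (· < ·) ∧ ∀ x, x ∈ tail ↔ (pvValid G x ∧ right ≤ x) := by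
  intro fuel
  induction fuel with
  | zero =>
    intro left right acc hfuel hl hlr h2 hr hinv hK
    have hlt : ¬ left < right := by omega
    have hlr' : left = right := by omega
    refine ⟨[], by simp [solutionLoop], List.Pairwise.nil, ?_⟩
    intro x
    simp only [List.not_mem_nil, false_iff]
    rintro ⟨⟨l'', h1, h2', h3⟩, hge⟩
    by_cases hll : l'' < left
    · exact hinv l'' x h1 hll hge h2' h3
    · have hK' : G < 2 * left - 1 := by
        rcases hK with h | h
        · omega
        · have : right * right - (left - 1) * (left - 1) = 2 * left - 1 := by
            subst hlr'; ring
          omega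
      have : 2 * l'' + 1 ≤ x * x - l'' * l'' := by nlinarith
      omega
  | succ fuel ih =>
    intro left right acc hfuel hl hlr h2 hr hinv hK
    by_cases hlt : left < right
    · by_cases hd : right * right - left * left = G
      · -- append right, advance right
        have h1' : left * left ≤ (right - 1) * (right - 1) := by nlinarith
        have hg3 : 2 * right - 1 ≤ G := by nlinarith
        have h3 : right + 1 ≤ max G 3 + 2 := by
          nlinarith [le_max_left G 3, le_max_right G 3]
        obtain ⟨tail, heq, hp, hm⟩ := ih left (right + 1) (acc ++ [right])
          (by omega) hl (by omega) (by omega) h3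
          (by intro l' r' a b c d; exact hinv l' r' a b (by omega) d)
          (by rcases hK with h | h
              · exact Or.inl h
              · refine Or.inr ?_
                have : (right + 1) * (right + 1) - (left - 1) * (left - 1)
                    = right * right - (left - 1) * (left - 1) + (2 * right + 1) := by ring
                omega)
        refine ⟨right :: tail, ?_, ?_, ?_⟩
        · rw [solutionLoop]; simp [hlt, hd, heq]
        · refine List.pairwise_cons.2 ⟨?_, hp⟩
          intro x hx
          have := ((hm x).1 hx).2
          omega
        · intro x
          constructor
          · intro hx
            rcases List.mem_cons.1 hx with h | h
            · subst h; exact ⟨⟨left, hl, hlt, hd⟩, le_refl _⟩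
            · obtain ⟨hv, hge⟩ := (hm x).1 h; exact ⟨hv, by omega⟩
          · rintro ⟨hv, hge⟩
            by_cases hx : x = right
            · simp [hx]
            · exact List.mem_cons.2 (Or.inr ((hm x).2 ⟨hv, by omega⟩))
      · by_cases hs : right * right - left * left < G
        · -- advance right; right is not valid
          have h1' : left * left ≤ (right - 1) * (right - 1) := by nlinarith
          have hg3 : 2 * right - 1 ≤ G := by nlinarith
          have h3 : right + 1 ≤ max G 3 + 2 := by
            nlinarith [le_max_left G 3, le_max_right G 3]
          obtain ⟨tail, heq, hp, hm⟩ := ih left (right + 1) acc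
            (by omega) hl (by omega) (by omega) h3
            (by intro l' r' a b c d; exact hinv l' r' a b (by omega) d)
            (by rcases hK with h | h
                · exact Or.inl h
                · refine Or.inr ?_
                  have : (right + 1) * (right + 1) - (left - 1) * (left - 1)
                      = right * right - (left - 1) * (left - 1) + (2 * right + 1) := by ring
                  omega)
          have hnv : ¬ pvValid G right := by
            rintro ⟨l'', hb1, hb2, hb3⟩
            by_cases hll : l'' < left
            · exact hinv l'' right hb1 hll (le_refl _) hb2 hb3
            · have : left * left ≤ l'' * l'' := by nlinarith
              nlinarith
          refine ⟨tail, ?_, hp, ?_⟩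
          · rw [solutionLoop]; simp [hlt, hd, hs, heq]
          · intro x
            rw [hm x]
            constructor
            · rintro ⟨hv, hge⟩; exact ⟨hv, by omega⟩
            · rintro ⟨hv, hge⟩
              refine ⟨hv, ?_⟩
              by_cases hx : x = right
              · exact absurd (hx ▸ hv) hnv
              · omega
        · -- advance left
          have hgt : G < right * right - left * left := by omega
          obtain ⟨tail, heq, hp, hm⟩ := ih (left + 1) right acc
            (by omega) (by omega) (by omega) h2 hr
            (by intro l' r' a b c d
                by_cases hll : l' < left
                · exact hinv l' r' a hll c d
                · have hle : l' = left := by omega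
                  subst hle
                  have : right * right ≤ r' * r' := by nlinarith
                  intro hcontra; nlinarith)
            (Or.inr (by simpa using hgt))
          refine ⟨tail, ?_, hp, hm⟩
          rw [solutionLoop]; simp [hlt, hd, hs, heq]
    · -- loop exit: left = right
      have hlr' : left = right := by omega
      refine ⟨[], by rw [solutionLoop]; simp [hlt], List.Pairwise.nil, ?_⟩
      intro x
      simp only [List.not_mem_nil, false_iff]
      rintro ⟨⟨l'', h1, h2', h3⟩, hge⟩
      by_cases hll : l'' < left
      · exact hinv l'' x h1 hll hge h2' h3
      · have hK' : G < 2 * left - 1 := by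
          rcases hK with h | h
          · omega
          · have : right * right - (left - 1) * (left - 1) = 2 * left - 1 := by
              subst hlr'; ring
            omega
        have : 2 * l'' + 1 ≤ x * x - l'' * l'' := by nlinarith
        omega

-- A's result: the strictly increasing list of all valid rights.
lemma solution_char (G : Int) : ∃ tail, solution G = tail ∧
    tail.Pairwise (· < ·) ∧ ∀ x, x ∈ tail ↔ pvValid G x := by
  obtain ⟨tail, heq, hp, hm⟩ := loopA_spec G (2 * (max G 3 + 2)).toNat 1 2 []
    (by omega) (by omega) (by omega) (by omega)
    (by have := le_max_right G 3; omega)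
    (by intro l' r' a b; omega) (Or.inl rfl)
  refine ⟨tail, by simpa [solution] using heq, hp, ?_⟩
  intro x
  rw [hm x]
  constructor
  · rintro ⟨hv, _⟩; exact hv
  · rintro hv
    obtain ⟨l, h1, h2, _⟩ := hv
    exact ⟨⟨l, h1, h2, by omega⟩, by omega⟩

-- divisor description unpacked: d and b = G/d multiply to G, b > d, b - d even
lemma divDesc_unpack (G d x : Int) (hd1 : 1 ≤ d) (h : pvDivDesc G d x) :
    ∃ b, G = d * b ∧ d < b ∧ (2 : Int) ∣ (b - d) ∧ 2 * x = d + b := by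
  obtain ⟨hsq, hmod, hpar, hx⟩ := h
  have hdpos : (0 : Int) < d := by omega
  have hdvd : d ∣ G := (PySem.Int.mod_eq_zero_iff_dvd G d).1 hmod
  obtain ⟨b, hb⟩ := hdvd
  have hfd : PySem.Int.floordiv G d = b := by
    rw [PySem.Int.floordiv_eq_ediv_of_pos hdpos, hb, Int.mul_ediv_cancel_left _ (by omega)]
  have hlt : d < b := by nlinarith
  have hpar' : (2 : Int) ∣ (b - d) := by
    have := (PySem.Int.mod_eq_zero_iff_dvd (PySem.Int.floordiv G d - d) 2).1 hpar
    rwa [hfd] at this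
  have hsum : (2 : Int) ∣ (d + b) := by
    obtain ⟨k, hk⟩ := hpar'
    exact ⟨d + k, by omega⟩
  have h2x : 2 * x = d + b := by
    obtain ⟨k, hk⟩ := hsum
    rw [hfd] at hx
    rw [hx, hk, PySem.Int.floordiv_eq_ediv_of_pos (by omega : (0:Int) < 2),
      Int.mul_ediv_cancel_left _ (by omega)]
  exact ⟨b, hb, hlt, hpar', h2x⟩

-- bridge: B's divisor description describes exactly the valid rights
lemma valid_iff_div (G x : Int) :
    pvValid G x ↔ ∃ d, 1 ≤ d ∧ pvDivDesc G d x := by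
  constructor
  · rintro ⟨l, h1, h2, h3⟩
    have hfd : PySem.Int.floordiv G (x - l) = x + l := by
      rw [PySem.Int.floordiv_eq_ediv_of_pos (by omega : (0:Int) < x - l)]
      have : G = (x - l) * (x + l) := by nlinarith
      rw [this, Int.mul_ediv_cancel_left _ (by omega)]
    refine ⟨x - l, by omega, ?_, ?_, ?_, ?_⟩
    · nlinarith
    · exact (PySem.Int.mod_eq_zero_iff_dvd G (x - l)).2 ⟨x + l, by nlinarith⟩
    · rw [hfd]
      exact (PySem.Int.mod_eq_zero_iff_dvd _ 2).2 ⟨l, by ring⟩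
    · rw [hfd]
      have : (x - l) + (x + l) = 2 * x := by ring
      rw [this, PySem.Int.floordiv_eq_ediv_of_pos (by omega : (0:Int) < 2),
        Int.mul_ediv_cancel_left _ (by omega)]
  · rintro ⟨d, hd1, hdesc⟩
    obtain ⟨b, hb, hlt, hpar, h2x⟩ := divDesc_unpack G d x hd1 hdesc
    obtain ⟨k, hk⟩ := hpar
    refine ⟨(b - d) / 2, ?_, ?_, ?_⟩
    · omega
    · omega
    · have hbx : b = x + (b - d) / 2 := by omega
      have hdx : d = x - (b - d) / 2 := by omega
      rw [hb]; nlinarith [hbx, hdx]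

-- emitted rights are strictly decreasing in the divisor
lemma div_anti (G d1 d2 x1 x2 : Int) (h1 : 1 ≤ d1) (hd : d1 < d2)
    (hx1 : pvDivDesc G d1 x1) (hx2 : pvDivDesc G d2 x2) : x2 < x1 := by
  obtain ⟨b1, hb1, hlt1, _, h2x1⟩ := divDesc_unpack G d1 x1 h1 hx1
  obtain ⟨b2, hb2, hlt2, _, h2x2⟩ := divDesc_unpack G d2 x2 (by omega) hx2
  have hprod : d1 * b1 = d2 * b2 := by omega
  have : (b1 + d1 - b2 - d2) * d1 = (d2 - d1) * (b2 - d1) := by nlinarith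
  have hpos : 0 < (d2 - d1) * (b2 - d1) := by
    apply mul_pos <;> omega
  nlinarith

-- B-side characterisation: with enough fuel the loop appends the emitted rights for
-- divisors ≥ a, strictly decreasing.
lemma loopB_spec (G : Int) : ∀ (fuel : Nat) (a : Int) (res : List Int),
    (G - a * a).toNat ≤ fuel → 1 ≤ a →
    ∃ out, solutionAltLoop G fuel a res = res ++ out ∧
      out.Pairwise (· > ·) ∧
      ∀ x, x ∈ out ↔ ∃ d, a ≤ d ∧ pvDivDesc G d x := by
  intro fuel
  induction fuel with
  | zero =>
    intro a res hfuel ha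
    have hlt : ¬ a * a < G := by omega
    refine ⟨[], by simp [solutionAltLoop], List.Pairwise.nil, ?_⟩
    intro x
    simp only [List.not_mem_nil, false_iff]
    rintro ⟨d, hda, hsq, _⟩
    have : a * a ≤ d * d := by nlinarith
    omega
  | succ fuel ih =>
    intro a res hfuel ha
    by_cases hlt : a * a < G
    · have hstep : (G - (a + 1) * (a + 1)).toNat ≤ fuel := by
        have : a * a < (a + 1) * (a + 1) := by nlinarith
        omega
      by_cases hc : PySem.Int.mod G a = 0 ∧ PySem.Int.mod (PySem.Int.floordiv G a - a) 2 = 0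
      · obtain ⟨out, heq, hp, hm⟩ := ih (a + 1)
          (res ++ [PySem.Int.floordiv (a + PySem.Int.floordiv G a) 2]) hstep (by omega)
        refine ⟨PySem.Int.floordiv (a + PySem.Int.floordiv G a) 2 :: out, ?_, ?_, ?_⟩
        · rw [solutionAltLoop]
          simp only [hlt, if_true]
          rw [if_pos hc, heq]
          simp
        · refine List.pairwise_cons.2 ⟨?_, hp⟩
          intro x hx
          obtain ⟨d, hda, hdesc⟩ := (hm x).1 hx
          exact div_anti G a d _ x ha (by omega) ⟨hlt, hc.1, hc.2, rfl⟩ hdesc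
        · intro x
          constructor
          · intro hx
            rcases List.mem_cons.1 hx with h | h
            · exact ⟨a, le_refl _, hlt, hc.1, hc.2, h⟩
            · obtain ⟨d, hda, hdesc⟩ := (hm x).1 h
              exact ⟨d, by omega, hdesc⟩
          · rintro ⟨d, hda, hdesc⟩
            by_cases hdeq : d = a
            · subst hdeq
              exact List.mem_cons.2 (Or.inl hdesc.2.2.2)
            · exact List.mem_cons.2 (Or.inr ((hm x).2 ⟨d, by omega, hdesc⟩))
      · obtain ⟨out, heq, hp, hm⟩ := ih (a + 1) res hstep (by omega)
        refine ⟨out, ?_, hp, ?_⟩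
        · rw [solutionAltLoop]
          simp only [hlt, if_true]
          rw [if_neg hc]
          exact heq
        · intro x
          rw [hm x]
          constructor
          · rintro ⟨d, hda, hdesc⟩; exact ⟨d, by omega, hdesc⟩
          · rintro ⟨d, hda, hdesc⟩
            refine ⟨d, ?_, hdesc⟩
            by_cases hdeq : d = a
            · subst hdeq; exact absurd ⟨hdesc.2.1, hdesc.2.2.1⟩ hc
            · omega
    · refine ⟨[], by rw [solutionAltLoop]; simp [hlt], List.Pairwise.nil, ?_⟩
      intro x
      simp only [List.not_mem_nil, false_iff]
      rintro ⟨d, hda, hsq, _⟩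
      have : a * a ≤ d * d := by nlinarith
      omega

-- B's result: the reverse of the loop output, i.e. the same strictly increasing list.
lemma solution_alt_char (G : Int) : ∃ ys, solution_alt G = ys ∧
    ys.Pairwise (· < ·) ∧ ∀ x, x ∈ ys ↔ pvValid G x := by
  obtain ⟨out, heq, hp, hm⟩ := loopB_spec G G.toNat 1 [] (by omega) (by omega)
  refine ⟨out.reverse, ?_, ?_, ?_⟩
  · unfold solution_alt
    rw [heq]
    simp only [List.nil_append]
    exact PySem.List.sorted_eq_of_perm_of_pairwise_lt out out.reverse (fun x => x)
      out.reverse_perm (by simpa using (List.pairwise_reverse.2 hp))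
  · simpa using (List.pairwise_reverse.2 hp)
  · intro x
    rw [List.mem_reverse, hm x, valid_iff_div]

-- ===== VERDICT (by name: the statement is the Claim_ definition above) =====
theorem solution_spec : Claim_equal_solution := by
  intro G _
  unfold Spec_solution
  obtain ⟨ta, hea, hpa, hma⟩ := solution_char G
  obtain ⟨tb, heb, hpb, hmb⟩ := solution_alt_char G
  rw [hea, heb]
  exact sorted_ext ta tb hpa hpb (fun a => by rw [hma a, hmb a])
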